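-- pv_equiv track=rewrite | github.com/Borgels/vaner | src/vaner/cli/commands/init.py | _parse_client_selection
-- ===== SOURCE A (Python) =====
-- def _parse_client_selection(raw: str, default_ids: set[str], ordered_ids: list[str]) -> tuple[set[str], bool]:
--     cleaned = raw.strip().lower()
--     if not cleaned:
--         return set(default_ids), False
--     if cleaned == "all":
--         return set(ordered_ids), False
--     if cleaned == "none":
--         return set(), False
--
--     tokens = [token for token in cleaned.replace(",", " ").split() if token]
--     show_other = any(token in {"o", "other"} for token in tokens)
--     numeric_tokens = [token for token in tokens if token not in {"o", "other"}]
--     if not numeric_tokens: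
--         return set(default_ids), show_other
--
--     selection: set[str] = set()
--     for token in numeric_tokens:
--         if token.startswith("+") or token.startswith("-"):
--             sign = token[0]
--             value = token[1:]
--             if not value.isdigit():
--                 continue
--             idx = int(value) - 1
--             if idx < 0 or idx >= len(ordered_ids):
--                 continue
--             client_id = ordered_ids[idx]
--             if sign == "+":
--                 selection.add(client_id)
--             else:
--                 selection.discard(client_id)
--             continue
--         if token.isdigit():
--             idx = int(token) - 1
--             if idx < 0 or idx >= len(ordered_ids):
--                 continue
--             selection.add(ordered_ids[idx])
--     return selection, show_other
-- ===== SOURCE B (Python) =====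
-- def _parse_client_selection(raw, default_ids, ordered_ids):
--     cleaned = raw.strip().lower()
--     if not cleaned:
--         return set(default_ids), False
--     if cleaned == "all":
--         return set(ordered_ids), False
--     if cleaned == "none":
--         return set(), False
--     tokens = _tokenize(cleaned)
--     show_other = "o" in tokens or "other" in tokens
--     numeric_tokens = [t for t in tokens if t != "o" and t != "other"]
--     if not numeric_tokens:
--         return set(default_ids), show_other
--     ops = [op for op in (_op_of(t, ordered_ids) for t in numeric_tokens) if op is not None]
--     selection = set()
--     for cid, keep in ops:
--         if keep:
--             selection.add(cid)
--         else:
--             selection.discard(cid)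
--     return selection, show_other
--
-- def _tokenize(s):
--     tokens = []
--     cur = ""
--     for ch in s:
--         if ch == "," or ch.isspace():
--             if cur:
--                 tokens.append(cur)
--                 cur = ""
--         else:
--             cur = cur + ch
--     if cur:
--         tokens.append(cur)
--     return tokens
--
-- def _op_of(token, ordered_ids):
--     keep = True
--     head = token[:1]
--     if head in ("+", "-"):
--         keep = head == "+"
--         token = token[1:]
--     if not token.isdigit():
--         return None
--     idx = int(token) - 1
--     if 0 <= idx < len(ordered_ids):
--         return (ordered_ids[idx], keep)
--     return None
-- ===== Notes on version B (the rewrite author's own statement) =====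
-- stated objective: alternative
-- what changed: B replaces A's replace(',',' ')+split() tokenization with a single hand-written character scan, and splits A's interleaved token loop into a parse phase (each token mapped to an optional (client_id, keep) operation) followed by a separate apply phase that folds add/discard over the operation list.
import Mathlib
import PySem

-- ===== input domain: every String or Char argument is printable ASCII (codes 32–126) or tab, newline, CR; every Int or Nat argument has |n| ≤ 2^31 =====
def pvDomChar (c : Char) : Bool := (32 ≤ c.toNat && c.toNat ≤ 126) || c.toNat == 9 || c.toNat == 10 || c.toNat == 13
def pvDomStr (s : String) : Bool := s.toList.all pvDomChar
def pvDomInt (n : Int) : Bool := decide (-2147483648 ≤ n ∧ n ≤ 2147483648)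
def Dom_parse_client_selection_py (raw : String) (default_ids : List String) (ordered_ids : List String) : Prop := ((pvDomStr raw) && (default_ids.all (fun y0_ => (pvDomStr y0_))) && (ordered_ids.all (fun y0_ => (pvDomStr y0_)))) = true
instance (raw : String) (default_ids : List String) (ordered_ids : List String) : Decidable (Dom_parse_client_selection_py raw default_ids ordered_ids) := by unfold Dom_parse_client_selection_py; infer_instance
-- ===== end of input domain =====

-- B replaces A's replace+split tokenization by a single hand-written character scan and splits the
-- token loop into a parse phase (token -> optional (id, keep) op) and an apply phase (alternative
-- decomposition, same cost).  Python A/B mutate nothing; equivalence is about the return value.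

-- ===== PORT A =====
def parse_client_selection_py (raw : String) (default_ids : List String) (ordered_ids : List String) : List String × Bool :=
  let cleaned := PySem.Str.lower (PySem.Str.strip raw)
  if cleaned = "" then (PySem.Set.ofList default_ids, false)
  else if cleaned = "all" then (PySem.Set.ofList ordered_ids, false)
  else if cleaned = "none" then (PySem.Set.empty, false)
  else
    let tokens := (PySem.Str.split₀ (PySem.Str.replace cleaned "," " ")).filter (fun t => !(t == ""))
    let show_other := tokens.any (fun t => t == "o" || t == "other")
    let numeric_tokens := tokens.filter (fun t => !(t == "o" || t == "other"))
    if numeric_tokens = [] then (PySem.Set.ofList default_ids, show_other)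
    else
      let selection := numeric_tokens.foldl (fun sel token =>
        if PySem.Str.startswith token "+" || PySem.Str.startswith token "-" then
          match PySem.Str.pyGet? token 0 with
          | none => sel   -- unreachable: startswith "+"/"-" forces a first character (Python token[0])
          | some sign =>
            let value := PySem.Str.slice token (some 1) none
            if !(PySem.Str.strIsdigit value) then sel
            else
              let idx : Int := (PySem.Int.ofStr? value).getD 0 - 1   -- getD unreachable: value.isdigit()
              if idx < 0 ∨ (ordered_ids.length : Int) ≤ idx then sel
              else match PySem.List.pyGet? ordered_ids idx with
                | none => sel   -- unreachable given the bounds check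
                | some client_id =>
                  if sign = '+' then PySem.Set.add sel client_id else PySem.Set.discard sel client_id
        else if PySem.Str.strIsdigit token then
          let idx : Int := (PySem.Int.ofStr? token).getD 0 - 1   -- getD unreachable: token.isdigit()
          if idx < 0 ∨ (ordered_ids.length : Int) ≤ idx then sel
          else match PySem.List.pyGet? ordered_ids idx with
            | none => sel   -- unreachable given the bounds check
            | some client_id => PySem.Set.add sel client_id
        else sel) PySem.Set.empty
      (selection, show_other)

-- ===== PORT B =====
-- B's hand tokenizer: split on commas and whitespace, never emits empty tokens
def pvTokenize (cs : List Char) (cur : List Char) : List (List Char) :=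
  match cs with
  | [] => if cur = [] then [] else [cur]
  | c :: rest =>
    if c = ',' || PySem.Chars.isspace c then
      (if cur = [] then pvTokenize rest [] else cur :: pvTokenize rest [])
    else pvTokenize rest (cur ++ [c])

-- B's parse phase: a token becomes `some (client_id, keep)` or `none`
def pvOpOf (token : String) (ordered_ids : List String) : Option (String × Bool) :=
  let head := PySem.Str.slice token (some 0) (some 1)
  let kt : Bool × String :=
    if head = "+" ∨ head = "-" then (head == "+", PySem.Str.slice token (some 1) none)
    else (true, token)
  if !(PySem.Str.strIsdigit kt.2) then none
  else
    let idx : Int := (PySem.Int.ofStr? kt.2).getD 0 - 1   -- getD unreachable: kt.2.isdigit()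
    if 0 ≤ idx ∧ idx < (ordered_ids.length : Int) then
      match PySem.List.pyGet? ordered_ids idx with
      | some client_id => some (client_id, kt.1)
      | none => none   -- unreachable given the bounds check
    else none

def parse_client_selection_py_alt (raw : String) (default_ids : List String) (ordered_ids : List String) : List String × Bool :=
  let cleaned := PySem.Str.lower (PySem.Str.strip raw)
  if cleaned = "" then (PySem.Set.ofList default_ids, false)
  else if cleaned = "all" then (PySem.Set.ofList ordered_ids, false)
  else if cleaned = "none" then (PySem.Set.empty, false)
  else
    let tokens := (pvTokenize cleaned.toList []).map String.ofList
    let show_other := tokens.contains "o" || tokens.contains "other"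
    let numeric_tokens := tokens.filter (fun t => !(t == "o") && !(t == "other"))
    if numeric_tokens = [] then (PySem.Set.ofList default_ids, show_other)
    else
      let ops := numeric_tokens.filterMap (fun t => pvOpOf t ordered_ids)
      let selection := ops.foldl (fun sel op =>
        if op.2 then PySem.Set.add sel op.1 else PySem.Set.discard sel op.1) PySem.Set.empty
      (selection, show_other)

-- ===== PRECONDITION & SPEC =====
def Spec_parse_client_selection_py (raw : String) (default_ids : List String) (ordered_ids : List String) (out : List String × Bool) : Prop := out = parse_client_selection_py_alt raw default_ids ordered_ids
instance (raw : String) (default_ids : List String) (ordered_ids : List String) (out : List String × Bool) : Decidable (Spec_parse_client_selection_py raw default_ids ordered_ids out) := by unfold Spec_parse_client_selection_py; infer_instance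

-- ===== CLAIM (what is proved, stated in full; the proofs are below) =====
def Claim_equal_parse_client_selection_py : Prop := ∀ (raw : String) (default_ids : List String) (ordered_ids : List String), Dom_parse_client_selection_py raw default_ids ordered_ids → Spec_parse_client_selection_py raw default_ids ordered_ids (parse_client_selection_py raw default_ids ordered_ids)

-- ===== LEMMAS AND PROOFS =====

-- ',' -> ' ', the effect of cleaned.replace(",", " ") on one character
def pvC (c : Char) : Char := if c = ',' then ' ' else c

lemma pv_ofList_eq_iff (l : List Char) (s : String) : (String.ofList l = s) ↔ l = s.toList := by
  constructor
  · intro h; rw [← h]; simp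
  · intro h; subst h; simp

lemma pv_replace_go (fuel : Nat) : ∀ (cs acc : List Char), cs.length ≤ fuel →
    PySem.Chars.replace.go [','] [' '] fuel cs acc = acc.reverse ++ cs.map pvC := by
  induction fuel with
  | zero =>
    intro cs acc h
    have hnil : cs = [] := List.eq_nil_of_length_eq_zero (Nat.le_zero.mp h)
    subst hnil
    simp [PySem.Chars.replace.go]
  | succ n ih =>
    intro cs acc h
    cases cs with
    | nil => simp [PySem.Chars.replace.go]
    | cons c t =>
      have ht : t.length ≤ n := by simpa using Nat.le_of_succ_le_succ h
      by_cases hc : c = ','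
      · subst hc
        have step : PySem.Chars.replace.go [','] [' '] (n + 1) (',' :: t) acc =
            PySem.Chars.replace.go [','] [' '] n t (' ' :: acc) := by
          simp [PySem.Chars.replace.go, List.isPrefixOf]
        rw [step, ih t (' ' :: acc) ht]
        simp [pvC]
      · have hc' : ((',' : Char) == c) = false := beq_eq_false_iff_ne.mpr (Ne.symm hc)
        have step : PySem.Chars.replace.go [','] [' '] (n + 1) (c :: t) acc =
            PySem.Chars.replace.go [','] [' '] n t (c :: acc) := by
          simp [PySem.Chars.replace.go, List.isPrefixOf, hc']
        rw [step, ih t (c :: acc) ht]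
        simp [pvC, hc]

lemma pv_replace_eq (cs : List Char) : PySem.Chars.replace cs [','] [' '] = cs.map pvC := by
  have := pv_replace_go cs.length cs [] (le_refl _)
  simpa [PySem.Chars.replace] using this

lemma pv_split₀_go_eq : ∀ (cs cur : List Char) (acc : List (List Char)),
    PySem.Chars.split₀.go (cs.map pvC) cur acc = acc.reverse ++ pvTokenize cs cur.reverse := by
  intro cs
  induction cs with
  | nil =>
    intro cur acc
    simp only [List.map_nil, PySem.Chars.split₀.go, pvTokenize]
    by_cases h : cur = [] <;> simp [h, List.isEmpty_iff]
  | cons c rest ih =>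
    intro cur acc
    by_cases hsp : pvC c = ',' ∨ PySem.Chars.isspace (pvC c)
    · have hspace : PySem.Chars.isspace (pvC c) := by
        rcases hsp with h | h
        · exfalso; by_cases hc : c = ',' <;> simp [pvC, hc] at h
        · exact h
      have horig : (c = ',' || PySem.Chars.isspace c) = true := by
        by_cases hc : c = ','
        · simp [hc]
        · simp [pvC, hc] at hspace; simp [hspace]
      simp only [List.map_cons, PySem.Chars.split₀.go, hspace, if_pos, pvTokenize, horig]
      by_cases h : cur = []
      · simp only [h, List.reverse_nil, List.isEmpty_nil, if_pos]
        simpa using ih [] acc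
      · have : cur.reverse ≠ [] := by simpa using h
        simp only [List.isEmpty_iff, this, if_neg, h, if_neg]
        rw [ih [] (cur.reverse :: acc)]
        simp
    · push_neg at hsp
      obtain ⟨h1, h2⟩ := hsp
      have hc : c ≠ ',' := by
        intro h
        exact h2 (by rw [h]; decide)
      have hpv : pvC c = c := by simp [pvC, hc]
      have hsp2 : PySem.Chars.isspace c = false := by
        rw [hpv] at h2; simpa using h2
      simp only [List.map_cons, hpv, PySem.Chars.split₀.go, hsp2, if_neg, pvTokenize, hc,
        Bool.false_or, Bool.or_self]
      rw [ih (c :: cur) acc]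
      simp

lemma pv_tok_ne_nil : ∀ (cs cur : List Char) (t : List Char), t ∈ pvTokenize cs cur → t ≠ [] := by
  intro cs
  induction cs with
  | nil =>
    intro cur t ht
    by_cases h : cur = [] <;> simp [pvTokenize, h] at ht
    subst ht; exact h
  | cons c rest ih =>
    intro cur t ht
    simp only [pvTokenize] at ht
    split at ht
    · split at ht
      · exact ih [] t ht
      · rename_i h
        rcases List.mem_cons.mp ht with rfl | h2
        · exact h
        · exact ih [] t h2
    · exact ih (cur ++ [c]) t ht

lemma pv_tokens_eq (cleaned : String) :
    (PySem.Str.split₀ (PySem.Str.replace cleaned "," " ")).filter (fun t => !(t == "")) =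
      (pvTokenize cleaned.toList []).map String.ofList := by
  have hto : (PySem.Str.replace cleaned "," " ").toList = cleaned.toList.map pvC := by
    rw [PySem.Str.toList_replace]
    have : ("," : String).toList = [','] := by decide
    have h2 : (" " : String).toList = [' '] := by decide
    rw [this, h2, pv_replace_eq]
  have hsplit : PySem.Chars.split₀ ((PySem.Str.replace cleaned "," " ").toList) =
      pvTokenize cleaned.toList [] := by
    rw [hto]
    have := pv_split₀_go_eq cleaned.toList [] []
    simpa [PySem.Chars.split₀] using this
  rw [PySem.Str.split₀, hsplit]
  rw [List.filter_map]
  have : (pvTokenize cleaned.toList []).filter ((fun t => !(t == "")) ∘ String.ofList) =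
      pvTokenize cleaned.toList [] := by
    apply List.filter_eq_self.mpr
    intro t ht
    have hne := pv_tok_ne_nil cleaned.toList [] t ht
    simp only [Function.comp_apply, Bool.not_eq_true', beq_eq_false_iff_ne, ne_eq,
      pv_ofList_eq_iff]
    simpa using hne
  rw [this]

lemma pv_show_other_eq (ts : List String) :
    ts.any (fun t => t == "o" || t == "other") = (ts.contains "o" || ts.contains "other") := by
  induction ts with
  | nil => simp
  | cons h t ih =>
    simp only [List.any_cons, List.contains_cons, ih]
    by_cases h1 : h = "o"
    · simp [h1]
    · by_cases h2 : h = "other"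
      · simp [h2]
      · simp [beq_eq_false_iff_ne.mpr h1, beq_eq_false_iff_ne.mpr h2,
          beq_eq_false_iff_ne.mpr (Ne.symm h1), beq_eq_false_iff_ne.mpr (Ne.symm h2)]

lemma pv_numeric_eq (ts : List String) :
    ts.filter (fun t => !(t == "o" || t == "other")) =
      ts.filter (fun t => !(t == "o") && !(t == "other")) := by
  apply List.filter_congr
  intro t _
  cases t == "o" <;> cases t == "other" <;> rfl

-- per-token: A's loop body equals "parse with pvOpOf, then apply"
lemma pv_step_eq (ordered_ids : List String) (sel : List String) (token : String) :
    (if PySem.Str.startswith token "+" || PySem.Str.startswith token "-" then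
        match PySem.Str.pyGet? token 0 with
        | none => sel
        | some sign =>
          let value := PySem.Str.slice token (some 1) none
          if !(PySem.Str.strIsdigit value) then sel
          else
            let idx : Int := (PySem.Int.ofStr? value).getD 0 - 1
            if idx < 0 ∨ (ordered_ids.length : Int) ≤ idx then sel
            else match PySem.List.pyGet? ordered_ids idx with
              | none => sel
              | some client_id =>
                if sign = '+' then PySem.Set.add sel client_id else PySem.Set.discard sel client_id
      else if PySem.Str.strIsdigit token then
        let idx : Int := (PySem.Int.ofStr? token).getD 0 - 1
        if idx < 0 ∨ (ordered_ids.length : Int) ≤ idx then sel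
        else match PySem.List.pyGet? ordered_ids idx with
          | none => sel
          | some client_id => PySem.Set.add sel client_id
      else sel) =
    (match pvOpOf token ordered_ids with
      | none => sel
      | some op => if op.2 then PySem.Set.add sel op.1 else PySem.Set.discard sel op.1) := by
  rcases htl : token.toList with _ | ⟨c, rest⟩
  · -- token = ""
    have htok : token = "" := by
      have := congrArg String.ofList htl; simpa using this
    subst htok
    have h1 : PySem.Str.startswith "" "+" = false := by decide
    have h2 : PySem.Str.startswith "" "-" = false := by decide
    have h3 : PySem.Str.strIsdigit "" = false := by decide
    have h4 : PySem.Str.slice "" (some 0) (some 1) = "" := by decide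
    simp [pvOpOf, h1, h2, h3, h4, PySem.Chars.startswith, List.isPrefixOf, PySem.Chars.strIsdigit]
  · have hswp : PySem.Str.startswith token "+" = ('+' == c) := by
      rw [PySem.Str.startswith_eq, htl]
      have hp : ("+" : String).toList = ['+'] := by decide
      rw [hp]
      simp [PySem.Chars.startswith, List.isPrefixOf]
    have hswm : PySem.Str.startswith token "-" = ('-' == c) := by
      rw [PySem.Str.startswith_eq, htl]
      have hp : ("-" : String).toList = ['-'] := by decide
      rw [hp]
      simp [PySem.Chars.startswith, List.isPrefixOf]
    have hget : PySem.Str.pyGet? token 0 = some c := by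
      simp [PySem.Str.pyGet?, htl, PySem.List.pyGet?, PySem.List.pyIdx?]
    have hs1 : PySem.Str.slice token (some 1) none = String.ofList rest := by
      simp [PySem.Str.slice, htl, PySem.List.slice_from]
    have hs01 : PySem.Str.slice token (some 0) (some 1) = String.ofList [c] := by
      simp [PySem.Str.slice, htl, PySem.List.slice_to]
    have hofp : (String.ofList [c] = "+") ↔ c = '+' := by
      rw [pv_ofList_eq_iff]
      constructor
      · intro h; cases h; rfl
      · intro h; subst h; decide
    have hofm : (String.ofList [c] = "-") ↔ c = '-' := by
      rw [pv_ofList_eq_iff]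
      constructor
      · intro h; cases h; rfl
      · intro h; subst h; decide
    by_cases hplus : c = '+'
    · subst hplus
      have hk : (String.ofList ['+'] == "+") = true := by decide
      simp only [pvOpOf, hswp, hswm, hget, hs1, hs01, hk]
      norm_num
      split_ifs <;>
        first
          | rfl
          | (exfalso; omega)
          | (cases hpg : PySem.List.pyGet? ordered_ids ((PySem.Int.ofChars? rest).getD 0 - 1) <;>
              simp [hpg])
      done
    · by_cases hminus : c = '-'
      · subst hminus
        have hk : (String.ofList ['-'] == "+") = false := by decide
        have hk2 : ('-' : Char) ≠ '+' := by decide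
        simp only [pvOpOf, hswp, hswm, hget, hs1, hs01, hk]
        norm_num [hk2]
        split_ifs <;>
          first
            | rfl
            | (exfalso; omega)
            | (cases hpg : PySem.List.pyGet? ordered_ids ((PySem.Int.ofChars? rest).getD 0 - 1) <;>
                simp [hpg])
      · have e1 : ('+' == c) = false := beq_eq_false_iff_ne.mpr (Ne.symm hplus)
        have e2 : ('-' == c) = false := beq_eq_false_iff_ne.mpr (Ne.symm hminus)
        have e3 : ¬(String.ofList [c] = "+" ∨ String.ofList [c] = "-") := by
          rw [hofp, hofm]; tauto
        simp only [pvOpOf, hswp, hswm, hs01, e1, e2, if_neg e3]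
        norm_num
        split_ifs <;>
          first
            | rfl
            | (exfalso; omega)
            | (exfalso; simp_all; done)
            | (cases hpg : PySem.List.pyGet? ordered_ids ((PySem.Int.ofStr? token).getD 0 - 1) <;>
                simp [hpg])
        done

lemma pv_fold_eq (ordered_ids : List String) (l : List String) (sel : List String) :
    l.foldl (fun sel token =>
      if PySem.Str.startswith token "+" || PySem.Str.startswith token "-" then
        match PySem.Str.pyGet? token 0 with
        | none => sel
        | some sign =>
          let value := PySem.Str.slice token (some 1) none
          if !(PySem.Str.strIsdigit value) then sel
          else
            let idx : Int := (PySem.Int.ofStr? value).getD 0 - 1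
            if idx < 0 ∨ (ordered_ids.length : Int) ≤ idx then sel
            else match PySem.List.pyGet? ordered_ids idx with
              | none => sel
              | some client_id =>
                if sign = '+' then PySem.Set.add sel client_id else PySem.Set.discard sel client_id
      else if PySem.Str.strIsdigit token then
        let idx : Int := (PySem.Int.ofStr? token).getD 0 - 1
        if idx < 0 ∨ (ordered_ids.length : Int) ≤ idx then sel
        else match PySem.List.pyGet? ordered_ids idx with
          | none => sel
          | some client_id => PySem.Set.add sel client_id
      else sel) sel =
    (l.filterMap (fun t => pvOpOf t ordered_ids)).foldl (fun sel op =>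
      if op.2 then PySem.Set.add sel op.1 else PySem.Set.discard sel op.1) sel := by
  induction l generalizing sel with
  | nil => rfl
  | cons h t ih =>
    simp only [List.foldl_cons, List.filterMap_cons]
    rw [pv_step_eq ordered_ids sel h]
    cases pvOpOf h ordered_ids with
    | none => exact ih _
    | some op => simp only [List.foldl_cons]; exact ih _

-- ===== VERDICT (by name: the statement is the Claim_ definition above) =====
theorem parse_client_selection_py_spec : Claim_equal_parse_client_selection_py := by
  intro raw default_ids ordered_ids _
  unfold Spec_parse_client_selection_py parse_client_selection_py parse_client_selection_py_alt
  simp only []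
  rw [pv_tokens_eq, pv_show_other_eq, pv_numeric_eq, pv_fold_eq]
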